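-- pv_equiv track=rewrite | github.com/julsix17/arxiv-lens | deep-analyze-paper/scripts/generate_note.py | _fallback_anchors
-- ===== SOURCE A (Python) =====
-- def _fallback_anchors(page_texts: list[str]) -> list[tuple[int, str]]:
--     """When no headings detected, split by page groups."""
--     anchors: list[tuple[int, str]] = []
--     offset = 0
--     labels = ['Abstract', 'Introduction', 'Method', 'Experiments', 'Conclusion']
--     total = len(page_texts)
--     if total == 0:
--         return [(0, 'Full Text')]
--     boundaries = [0, 1, max(2, total // 4), max(total // 2, 3), max(total - 2, total // 2 + 1)]
--     for bi, boundary in enumerate(boundaries):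
--         if bi < len(labels):
--             page_offset = sum(len(page_texts[p]) + 1 for p in range(boundary))
--             anchors.append((page_offset, labels[bi]))
--     return anchors if anchors else [(0, 'Full Text')]
-- ===== SOURCE B (Python) =====
-- def _fallback_anchors(page_texts: list[str]) -> list[tuple[int, str]]:
--     """When no headings detected, split by page groups."""
--     total = len(page_texts)
--     if total == 0:
--         return [(0, 'Full Text')]
--     prefix = [0]
--     for t in page_texts:
--         prefix.append(prefix[-1] + len(t) + 1)
--     labels = ['Abstract', 'Introduction', 'Method', 'Experiments', 'Conclusion']
--     boundaries = [0, 1, max(2, total // 4), max(total // 2, 3), max(total - 2, total // 2 + 1)]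
--     return [(prefix[b], labels[i]) for i, b in enumerate(boundaries[:len(labels)])]
-- ===== Notes on version B (the rewrite author's own statement) =====
-- stated objective: alternative
-- what changed: B builds a prefix-offset array of cumulative page lengths in one pass and turns each anchor into a single array lookup, replacing A's per-boundary re-summation over all preceding pages; it also drops A's dead empty-anchors fallback.
import Mathlib
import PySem

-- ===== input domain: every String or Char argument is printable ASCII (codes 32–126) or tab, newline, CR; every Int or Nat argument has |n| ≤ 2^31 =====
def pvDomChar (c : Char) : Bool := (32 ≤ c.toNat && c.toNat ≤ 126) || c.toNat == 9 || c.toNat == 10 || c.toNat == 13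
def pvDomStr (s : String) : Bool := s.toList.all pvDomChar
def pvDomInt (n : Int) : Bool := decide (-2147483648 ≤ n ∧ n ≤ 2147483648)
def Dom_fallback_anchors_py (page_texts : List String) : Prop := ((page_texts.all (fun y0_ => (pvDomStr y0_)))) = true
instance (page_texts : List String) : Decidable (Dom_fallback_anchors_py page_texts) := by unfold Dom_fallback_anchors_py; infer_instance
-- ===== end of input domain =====

-- B replaces the per-boundary re-summation of page lengths by a prefix-offset array
-- built in one pass, so each anchor is a single lookup (objective: alternative).

-- ===== PORT A =====
def fallback_anchors_py (page_texts : List String) : List (Int × String) :=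
  let labels : List String := ["Abstract", "Introduction", "Method", "Experiments", "Conclusion"]
  let total : Int := page_texts.length
  if total = 0 then [(0, "Full Text")]
  else
    let boundaries : List Int :=
      [0, 1, max 2 (PySem.Int.floordiv total 4),
       max (PySem.Int.floordiv total 2) 3,
       max (total - 2) (PySem.Int.floordiv total 2 + 1)]
    let anchors := (PySem.List.enumerate boundaries 0).foldl (fun acc bb =>
      if bb.1 < (labels.length : Int) then
        acc ++ [((PySem.List.pyRange 0 bb.2 1).foldl
          (fun s p => s + PySem.Str.len (PySem.List.pyGetD page_texts p "") + 1) 0,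
          PySem.List.pyGetD labels bb.1 "")]
      else acc) []
    if anchors = [] then [(0, "Full Text")] else anchors

-- ===== PORT B =====
def fallback_anchors_py_alt (page_texts : List String) : List (Int × String) :=
  let total : Int := page_texts.length
  if total = 0 then [(0, "Full Text")]
  else
    let prefixArr := page_texts.foldl
      (fun pre t => pre ++ [PySem.List.pyGetD pre (-1) 0 + PySem.Str.len t + 1]) [(0 : Int)]
    let labels : List String := ["Abstract", "Introduction", "Method", "Experiments", "Conclusion"]
    let boundaries : List Int :=
      [0, 1, max 2 (PySem.Int.floordiv total 4),
       max (PySem.Int.floordiv total 2) 3,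
       max (total - 2) (PySem.Int.floordiv total 2 + 1)]
    (PySem.List.enumerate (PySem.List.slice boundaries none (some (labels.length : Int))) 0).map
      (fun ib => (PySem.List.pyGetD prefixArr ib.2 0, PySem.List.pyGetD labels ib.1 ""))

-- ===== PRECONDITION & SPEC =====
-- Pre_ excludes lists of exactly 1 or 2 pages, on which A raises IndexError
-- (a boundary exceeds the page count, so page_texts[p] is accessed out of range).
def Pre_fallback_anchors_py (page_texts : List String) : Prop :=
  page_texts = [] ∨ 3 ≤ page_texts.length
instance (page_texts : List String) : Decidable (Pre_fallback_anchors_py page_texts) := by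
  unfold Pre_fallback_anchors_py; infer_instance

def pvWitness_fallback_anchors_py : List String := ["ab", "cd", "ef"]

def Spec_fallback_anchors_py (page_texts : List String) (out : List (Int × String)) : Prop :=
  out = fallback_anchors_py_alt page_texts
instance (page_texts : List String) (out : List (Int × String)) :
    Decidable (Spec_fallback_anchors_py page_texts out) := by
  unfold Spec_fallback_anchors_py; infer_instance

-- ===== CLAIM (what is proved, stated in full; the proofs are below) =====
def Claim_equal_fallback_anchors_py : Prop :=
  ∀ (page_texts : List String), Dom_fallback_anchors_py page_texts →
    Pre_fallback_anchors_py page_texts →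
    Spec_fallback_anchors_py page_texts (fallback_anchors_py page_texts)

-- ===== LEMMAS AND PROOFS =====

-- sum of (len + 1) over the first k pages
def sumTake (xs : List String) (k : Nat) : Int :=
  ((xs.take k).map (fun t => PySem.Str.len t + 1)).sum

-- B's prefix array, as a standalone definition for the lemmas
def prefA (xs : List String) : List Int :=
  xs.foldl (fun pre t => pre ++ [PySem.List.pyGetD pre (-1) 0 + PySem.Str.len t + 1]) [(0 : Int)]

lemma pref_eq (xs : List String) :
    prefA xs = (List.range (xs.length + 1)).map (fun k => sumTake xs k) := by
  induction xs using List.reverseRecOn with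
  | nil => simp [prefA, sumTake]
  | append_singleton xs t ih =>
    have hstep : prefA (xs ++ [t])
        = prefA xs ++ [PySem.List.pyGetD (prefA xs) (-1) 0 + PySem.Str.len t + 1] := by
      simp [prefA, List.foldl_append]
    have hlast : PySem.List.pyGetD (prefA xs) (-1) 0 = sumTake xs xs.length := by
      rw [ih, List.range_succ, List.map_append]
      exact PySem.List.pyGetD_neg_one_append_singleton _ _ _
    rw [hstep, hlast, ih, List.length_append, List.length_singleton,
        List.range_succ (n := xs.length + 1), List.map_append]
    congr 1
    · apply List.map_congr_left
      intro k hk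
      simp only [List.mem_range] at hk
      simp [sumTake, List.take_append_of_le_length (by omega : k ≤ xs.length)]
    · have h1 : sumTake (xs ++ [t]) (xs.length + 1)
          = sumTake xs xs.length + PySem.Str.len t + 1 := by
        have : (xs ++ [t]).take (xs.length + 1) = xs.take xs.length ++ [t] := by
          simp
        simp [sumTake, this]
        ring
      simp [h1]

lemma sum_side (xs : List String) (n : Nat) (h : n ≤ xs.length) :
    (PySem.List.pyRange 0 (n : Int) 1).foldl
      (fun s p => s + PySem.Str.len (PySem.List.pyGetD xs p "") + 1) 0
    = sumTake xs n := by
  induction n with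
  | zero => simp [PySem.List.pyRange_one_eq_nil, sumTake]
  | succ m ih =>
    have hm : m < xs.length := by omega
    have htake : sumTake xs (m + 1) = sumTake xs m + (PySem.Str.len xs[m] + 1) := by
      unfold sumTake
      simp only [List.map_take]
      rw [List.sum_take_succ _ m (by simpa using hm)]
      simp
    rw [show ((m + 1 : Nat) : Int) = (m : Int) + 1 by push_cast; ring,
        PySem.List.pyRange_one_succ_right (by positivity), List.foldl_append,
        List.foldl_cons, List.foldl_nil, ih (by omega), htake,
        PySem.List.pyGetD_natCast, List.getD_eq_getElem xs _ hm]
    ring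

lemma pref_getD (xs : List String) (b : Int) (h0 : 0 ≤ b) (h1 : b ≤ xs.length) :
    PySem.List.pyGetD (prefA xs) b 0 = sumTake xs b.toNat := by
  rw [pref_eq]
  obtain ⟨n, rfl⟩ : ∃ n : Nat, b = (n : Int) := ⟨b.toNat, (Int.toNat_of_nonneg h0).symm⟩
  rw [PySem.List.pyGetD_natCast]
  simp only [Nat.cast_le] at h1
  rw [List.getD_eq_getElem _ _ (by simp; omega)]
  simp

lemma key (xs : List String) (b : Int) (h0 : 0 ≤ b) (h1 : b ≤ xs.length) :
    (PySem.List.pyRange 0 b 1).foldl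
      (fun s p => s + PySem.Str.len (PySem.List.pyGetD xs p "") + 1) 0
    = PySem.List.pyGetD (prefA xs) b 0 := by
  obtain ⟨n, rfl⟩ : ∃ n : Nat, b = (n : Int) := ⟨b.toNat, (Int.toNat_of_nonneg h0).symm⟩
  rw [pref_getD _ _ h0 h1, sum_side _ _ (by exact_mod_cast h1)]
  simp

-- ===== VERDICT (by name: the statement is the Claim_ definition above) =====
theorem fallback_anchors_py_spec : Claim_equal_fallback_anchors_py := by
  intro xs _hdom hpre
  unfold Spec_fallback_anchors_py
  rcases hpre with rfl | h3
  · decide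
  · have hne : ((xs.length : Int)) ≠ 0 := by
      have : (3 : Int) ≤ xs.length := by exact_mod_cast h3
      omega
    have hd4 : PySem.Int.floordiv (xs.length : Int) 4 = (xs.length : Int) / 4 :=
      PySem.Int.floordiv_eq_ediv_of_pos (by norm_num)
    have hd2 : PySem.Int.floordiv (xs.length : Int) 2 = (xs.length : Int) / 2 :=
      PySem.Int.floordiv_eq_ediv_of_pos (by norm_num)
    have hL : (3 : Int) ≤ (xs.length : Int) := by exact_mod_cast h3
    simp only [fallback_anchors_py, fallback_anchors_py_alt, if_neg hne,
      PySem.List.enumerate_cons, PySem.List.enumerate_nil,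
      List.foldl_cons, List.foldl_nil]
    norm_num [PySem.List.slice, PySem.List.clampIdx, show ((5:Int).toNat = 5) from rfl, List.take_succ_cons,
      PySem.List.enumerate_cons, PySem.List.enumerate_nil, List.map_cons, List.map_nil]
    rw [if_neg (List.cons_ne_nil _ _)]
    simp only [List.cons.injEq, Prod.mk.injEq]
    and_intros
    all_goals first
      | rfl
      | (exact key xs _ (by omega) (by omega))
      | (show (0:Int) = PySem.List.pyGetD (prefA xs) 0 0
         rw [pref_getD xs 0 le_rfl (by positivity)]; simp [sumTake])
      | trivial
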